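-- pv_equiv track=rewrite | github.com/ElouanR/Advent-Of-Code-2023 | Day 07/Part 2/main.py | is_fiveK
-- ===== SOURCE A (Python) =====
-- def is_fiveK(line):
--     char_counts = {}
--     joker_count = line.count('J')
--
--     for char in line:
--         if char != 'J':
--             if char in char_counts:
--                 char_counts[char] += 1
--             else:
--                 char_counts[char] = 1
--
--     for char in char_counts:
--         if char_counts[char] < 5 and joker_count > 0:
--             joker_needed = 5 - char_counts[char]
--             if joker_needed <= joker_count:
--                 char_counts[char] += joker_needed
--                 joker_count -= joker_needed
--
--     if joker_count == 5:
--         char_counts['J'] = 5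
--         joker_count -= 5
--
--     result = 5 in char_counts.values()
--
--     return result
-- ===== SOURCE B (Python) =====
-- def is_fiveK(line):
--     joker = line.count('J')
--     if joker == 5:
--         return True
--     counts = {}
--     for c in line:
--         if c != 'J':
--             counts[c] = counts.get(c, 0) + 1
--     return any(5 - joker <= v <= 5 for v in counts.values())
-- ===== Notes on version B (the rewrite author's own statement) =====
-- stated objective: simpler
-- what changed: Replaces the greedy joker-allocation loop that mutates the count dict plus the joker_count==5 special case by a closed-form predicate: joker==5, or some non-J count v satisfies 5-joker <= v <= 5.
import Mathlib
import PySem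

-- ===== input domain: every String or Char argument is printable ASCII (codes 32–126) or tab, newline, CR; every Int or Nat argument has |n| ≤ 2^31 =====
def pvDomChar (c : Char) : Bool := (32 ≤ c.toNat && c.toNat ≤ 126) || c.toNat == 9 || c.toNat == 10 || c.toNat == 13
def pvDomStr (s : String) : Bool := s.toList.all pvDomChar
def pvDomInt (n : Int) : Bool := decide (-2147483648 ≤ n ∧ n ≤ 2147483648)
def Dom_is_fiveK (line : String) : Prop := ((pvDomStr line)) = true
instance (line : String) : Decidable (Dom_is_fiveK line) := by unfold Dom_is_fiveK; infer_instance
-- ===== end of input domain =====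

-- B replaces A's greedy joker-allocation loop by a closed-form range predicate over the counts (same cost, simpler).

-- ===== PORT A =====
def is_fiveK (line : String) : Bool :=
  let jokerCount : Int := (PySem.Str.count line "J" : Int)
  let charCounts : PySem.Dict Char Int :=
    line.toList.foldl (fun d char =>
      if char ≠ 'J' then
        if d.contains char then d.modify char 0 (· + 1) else d.insert char 1
      else d) PySem.Dict.empty
  -- 'for char in char_counts:' iterates the keys fixed at loop entry; only values are mutated
  let st :=
    charCounts.keys.foldl (fun (st : PySem.Dict Char Int × Int) char =>
      if st.1.getD char 0 < 5 ∧ 0 < st.2 then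
        let jokerNeeded := 5 - st.1.getD char 0
        if jokerNeeded ≤ st.2 then
          (st.1.insert char (st.1.getD char 0 + jokerNeeded), st.2 - jokerNeeded)
        else st
      else st) (charCounts, jokerCount)
  let st2 := if st.2 = 5 then (st.1.insert 'J' (5 : Int), st.2 - 5) else st
  decide ((5 : Int) ∈ st2.1.values)

-- ===== PORT B =====
def is_fiveK_alt (line : String) : Bool :=
  let joker : Int := (PySem.Str.count line "J" : Int)
  if joker = 5 then true
  else
    let counts : PySem.Dict Char Int :=
      line.toList.foldl (fun d c =>
        if c ≠ 'J' then d.insert c (d.getD c 0 + 1) else d) PySem.Dict.empty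
    counts.values.any (fun v => decide (5 - joker ≤ v) && decide (v ≤ 5))

-- ===== PRECONDITION & SPEC =====
def Spec_is_fiveK (line : String) (out : Bool) : Prop := out = is_fiveK_alt line
instance (line : String) (out : Bool) : Decidable (Spec_is_fiveK line out) := by unfold Spec_is_fiveK; infer_instance

-- ===== CLAIM (what is proved, stated in full; the proofs are below) =====
def Claim_equal_is_fiveK : Prop := ∀ (line : String), Dom_is_fiveK line → Spec_is_fiveK line (is_fiveK line)

-- ===== LEMMAS AND PROOFS =====

-- A's count-building step ('if char in d: d[char] += 1 else: d[char] = 1') equals B's ('d[c] = d.get(c,0)+1')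
theorem buildStep_eq (d : PySem.Dict Char Int) (c : Char) :
    (if d.contains c then d.modify c 0 (· + 1) else d.insert c 1) = d.insert c (d.getD c 0 + 1) := by
  by_cases h : d.contains c
  · simp [h, PySem.Dict.modify, PySem.Dict.getD]
  · rw [if_neg h, PySem.Dict.getD_of_not_contains d 0 (by simpa using h)]; norm_num

-- the two count-building loops produce the same dict
theorem build_eq (cs : List Char) :
    cs.foldl (fun d char =>
        if char ≠ 'J' then
          if d.contains char then d.modify char 0 (· + 1) else d.insert char 1
        else d) (PySem.Dict.empty : PySem.Dict Char Int)
      = cs.foldl (fun d c =>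
        if c ≠ 'J' then d.insert c (d.getD c 0 + 1) else d) (PySem.Dict.empty : PySem.Dict Char Int) := by
  refine List.foldl_ext _ _ _ (fun d c _ => ?_)
  by_cases h : c ≠ 'J'
  · simp only [if_pos h, buildStep_eq]
  · simp [h]

-- B's build keeps keys Nodup
theorem build_nodup (cs : List Char) (d : PySem.Dict Char Int) (h : d.keys.Nodup) :
    (cs.foldl (fun d c => if c ≠ 'J' then d.insert c (d.getD c 0 + 1) else d) d).keys.Nodup := by
  induction cs generalizing d with
  | nil => exact h
  | cons c cs ih =>
      simp only [List.foldl_cons]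
      by_cases hc : c ≠ 'J'
      · exact ih _ (by rw [if_pos hc]; exact PySem.Dict.nodup_keys_insert d c _ h)
      · rw [if_neg hc]; exact ih _ h

-- abbreviation for A's joker-allocation step (proof-side only)
def allocStep (st : PySem.Dict Char Int × Int) (char : Char) : PySem.Dict Char Int × Int :=
  if st.1.getD char 0 < 5 ∧ 0 < st.2 then
    let jokerNeeded := 5 - st.1.getD char 0
    if jokerNeeded ≤ st.2 then
      (st.1.insert char (st.1.getD char 0 + jokerNeeded), st.2 - jokerNeeded)
    else st
  else st

-- the allocation loop keeps keys Nodup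
theorem alloc_nodup (ks : List Char) (d : PySem.Dict Char Int) (j : Int) (h : d.keys.Nodup) :
    (ks.foldl allocStep (d, j)).1.keys.Nodup := by
  induction ks generalizing d j with
  | nil => exact h
  | cons k ks ih =>
      simp only [List.foldl_cons, allocStep]
      split
      · split
        · exact ih _ _ (PySem.Dict.nodup_keys_insert d k _ h)
        · exact ih d j h
      · exact ih d j h

-- the heart: after the allocation loop, "some count is 5, or the joker counter is exactly 5" has a closed form
theorem alloc_iff (ks : List Char) (d : PySem.Dict Char Int) (j : Int) :
    ((∃ k ∈ (ks.foldl allocStep (d, j)).1.keys, (ks.foldl allocStep (d, j)).1.getD k 0 = 5)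
      ∨ (ks.foldl allocStep (d, j)).2 = 5)
    ↔ ((∃ k ∈ d.keys, d.getD k 0 = 5) ∨ j = 5
        ∨ ∃ k ∈ ks, d.getD k 0 < 5 ∧ 5 - d.getD k 0 ≤ j) := by
  induction ks generalizing d j with
  | nil => simp
  | cons k ks ih =>
      simp only [List.foldl_cons]
      by_cases halloc : d.getD k 0 < 5 ∧ 5 - d.getD k 0 ≤ j
      · have hstep : allocStep (d, j) k
            = (d.insert k (d.getD k 0 + (5 - d.getD k 0)), j - (5 - d.getD k 0)) := by
          simp only [allocStep]
          rw [if_pos ⟨halloc.1, by omega⟩, if_pos halloc.2]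
        rw [hstep, ih]
        constructor
        · intro _
          exact Or.inr (Or.inr ⟨k, List.mem_cons_self, halloc⟩)
        · intro _
          refine Or.inl ⟨k, ?_, ?_⟩
          · exact (PySem.Dict.mem_keys_insert _ _ _ _).mpr (Or.inl rfl)
          · rw [PySem.Dict.getD_insert_self]; omega
      · have hstep : allocStep (d, j) k = (d, j) := by
          simp only [allocStep]
          split
          · rename_i hc
            rw [if_neg (by omega)]
          · rfl
        rw [hstep, ih]
        constructor
        · rintro (h | h | ⟨k', hk', hv⟩)
          · exact Or.inl h
          · exact Or.inr (Or.inl h)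
          · exact Or.inr (Or.inr ⟨k', List.mem_cons_of_mem _ hk', hv⟩)
        · rintro (h | h | ⟨k', hk', hv⟩)
          · exact Or.inl h
          · exact Or.inr (Or.inl h)
          · rcases List.mem_cons.mp hk' with rfl | hk'
            · exact absurd hv halloc
            · exact Or.inr (Or.inr ⟨k', hk', hv⟩)

-- membership in values, through keys (for a dict with Nodup keys)
theorem mem_values_iff (d : PySem.Dict Char Int) (h : d.keys.Nodup) (v : Int) :
    v ∈ d.values ↔ ∃ k ∈ d.keys, d.getD k 0 = v := by
  rw [PySem.Dict.values_eq_map_keys d h 0, List.mem_map]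

-- ===== VERDICT (by name: the statement is the Claim_ definition above) =====
theorem is_fiveK_spec : Claim_equal_is_fiveK := by
  intro line _
  show is_fiveK line = is_fiveK_alt line
  simp only [is_fiveK, is_fiveK_alt]
  rw [build_eq]
  set j : Int := (PySem.Str.count line "J" : Int) with hj
  have hj0 : 0 ≤ j := Int.natCast_nonneg _
  set d0 : PySem.Dict Char Int :=
    line.toList.foldl (fun d c => if c ≠ 'J' then d.insert c (d.getD c 0 + 1) else d)
      PySem.Dict.empty with hd0
  have hnd0 : d0.keys.Nodup := build_nodup _ _ (by decide)
  rw [show (fun (st : PySem.Dict Char Int × Int) char =>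
      if st.1.getD char 0 < 5 ∧ 0 < st.2 then
        let jokerNeeded := 5 - st.1.getD char 0
        if jokerNeeded ≤ st.2 then
          (st.1.insert char (st.1.getD char 0 + jokerNeeded), st.2 - jokerNeeded)
        else st
      else st) = allocStep from rfl]
  set st := d0.keys.foldl allocStep (d0, j) with hst
  have hnd1 : st.1.keys.Nodup := alloc_nodup _ _ _ hnd0
  have hmain := alloc_iff d0.keys d0 j
  -- closed form shared by both sides
  have hB : ((∃ k ∈ d0.keys, d0.getD k 0 = 5) ∨ j = 5
        ∨ ∃ k ∈ d0.keys, d0.getD k 0 < 5 ∧ 5 - d0.getD k 0 ≤ j)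
      ↔ (j = 5 ∨ ∃ k ∈ d0.keys, 5 - j ≤ d0.getD k 0 ∧ d0.getD k 0 ≤ 5) := by
    constructor
    · rintro (⟨k, hk, hv⟩ | h | ⟨k, hk, hv⟩)
      · exact Or.inr ⟨k, hk, by omega⟩
      · exact Or.inl h
      · exact Or.inr ⟨k, hk, by omega⟩
    · rintro (h | ⟨k, hk, hv⟩)
      · exact Or.inr (Or.inl h)
      · by_cases h5 : d0.getD k 0 = 5
        · exact Or.inl ⟨k, hk, h5⟩
        · exact Or.inr (Or.inr ⟨k, hk, by omega⟩)
  rw [Bool.eq_iff_iff]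
  constructor
  · intro hA
    have hL : (∃ k ∈ st.1.keys, st.1.getD k 0 = 5) ∨ st.2 = 5 := by
      by_cases h5 : st.2 = 5
      · exact Or.inr h5
      · rw [if_neg h5, decide_eq_true_iff, mem_values_iff _ hnd1] at hA
        exact Or.inl hA
    have := hB.mp (hmain.mp hL)
    rcases this with h | ⟨k, hk, hv⟩
    · simp [h]
    · by_cases h5 : j = 5
      · simp [h5]
      · rw [if_neg h5, List.any_eq_true]
        refine ⟨d0.getD k 0, ?_, by simp; omega⟩
        exact (mem_values_iff _ hnd0 _).mpr ⟨k, hk, rfl⟩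
  · intro hBtrue
    have hR : j = 5 ∨ ∃ k ∈ d0.keys, 5 - j ≤ d0.getD k 0 ∧ d0.getD k 0 ≤ 5 := by
      by_cases h5 : j = 5
      · exact Or.inl h5
      · rw [if_neg h5, List.any_eq_true] at hBtrue
        obtain ⟨v, hv, hp⟩ := hBtrue
        obtain ⟨k, hk, rfl⟩ := (mem_values_iff _ hnd0 _).mp hv
        simp only [Bool.and_eq_true, decide_eq_true_iff] at hp
        exact Or.inr ⟨k, hk, hp⟩
    have hL := hmain.mpr (hB.mpr hR)
    by_cases h5 : st.2 = 5
    · rw [if_pos h5, decide_eq_true_iff,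
        mem_values_iff _ (PySem.Dict.nodup_keys_insert _ _ _ hnd1)]
      exact ⟨'J', (PySem.Dict.mem_keys_insert _ _ _ _).mpr (Or.inl rfl),
        PySem.Dict.getD_insert_self _ _ _ _⟩
    · rw [if_neg h5, decide_eq_true_iff, mem_values_iff _ hnd1]
      rcases hL with h | h
      · exact h
      · exact absurd h h5
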